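-- pv_equiv track=rewrite | github.com/anifilm/for-coding-test | checkio/python/Escher/The_Ship_Teams.py | two_teams
-- ===== SOURCE A (Python) =====
-- def two_teams(sailors):
--     team_a = []
--     team_b = []
--
--     for name in sailors.keys():
--         if sailors.get(name) > 40 or sailors.get(name) < 20:
--             team_a += [name]
--         elif 20 <= sailors.get(name) <= 40:
--             team_b += [name]
--
--     team_a.sort()
--     team_b.sort()
--
--     return [team_a, team_b]
-- ===== SOURCE B (Python) =====
-- def _insert_sorted(lst, name):
--     i = 0
--     while i < len(lst) and lst[i] < name:
--         i += 1
--     lst.insert(i, name)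
--
-- def two_teams(sailors):
--     team_a = []
--     team_b = []
--     for name, age in sailors.items():
--         if age > 40 or age < 20:
--             _insert_sorted(team_a, name)
--         else:
--             _insert_sorted(team_b, name)
--     return [team_a, team_b]
-- ===== Notes on version B (the rewrite author's own statement) =====
-- stated objective: alternative
-- what changed: B never calls sort: it maintains each team as a sorted list by inserting every name at its binary-search-free scan position as it arrives (online insertion sort), instead of A's build-both-lists-then-Timsort with three dict lookups per key.
import Mathlib
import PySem

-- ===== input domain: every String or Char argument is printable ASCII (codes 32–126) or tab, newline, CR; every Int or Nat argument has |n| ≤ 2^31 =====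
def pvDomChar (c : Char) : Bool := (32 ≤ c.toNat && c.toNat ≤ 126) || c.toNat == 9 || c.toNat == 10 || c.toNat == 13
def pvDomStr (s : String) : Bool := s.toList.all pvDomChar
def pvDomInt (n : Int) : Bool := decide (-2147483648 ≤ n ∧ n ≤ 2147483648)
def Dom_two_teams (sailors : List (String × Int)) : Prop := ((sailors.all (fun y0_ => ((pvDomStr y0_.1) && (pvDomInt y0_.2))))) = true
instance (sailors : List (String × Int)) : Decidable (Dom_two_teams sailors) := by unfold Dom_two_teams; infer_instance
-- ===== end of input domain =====

-- B replaces A's build-then-sort by an online insertion sort: each name is inserted at its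
-- sorted position in its team as it is visited; no sort call remains. Return values proved equal.

-- ===== PORT A =====
def two_teams (sailors : List (String × Int)) : List (List String) :=
  let d := PySem.Dict.ofList sailors
  let teams := d.keys.foldl (fun (acc : List String × List String) name =>
      if ((d.get? name).getD 0) > 40 ∨ ((d.get? name).getD 0) < 20 then
        (acc.1 ++ [name], acc.2)
      else if 20 ≤ ((d.get? name).getD 0) ∧ ((d.get? name).getD 0) ≤ 40 then
        (acc.1, acc.2 ++ [name])
      else acc) ([], [])
  [PySem.List.sorted teams.1 (fun x => x) false, PySem.List.sorted teams.2 (fun x => x) false]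

-- ===== PORT B =====
-- port of Source B's _insert_sorted: scan past the elements smaller than `name`, insert there
def insertSorted : List String → String → List String
  | [], name => [name]
  | x :: xs, name => if x < name then x :: insertSorted xs name else name :: x :: xs

def two_teams_alt (sailors : List (String × Int)) : List (List String) :=
  let d := PySem.Dict.ofList sailors
  let teams := d.items.foldl (fun (acc : List String × List String) it =>
      if it.2 > 40 ∨ it.2 < 20 then (insertSorted acc.1 it.1, acc.2)
      else (acc.1, insertSorted acc.2 it.1)) ([], [])
  [teams.1, teams.2]

-- ===== PRECONDITION & SPEC =====
def Spec_two_teams (sailors : List (String × Int)) (out : List (List String)) : Prop := out = two_teams_alt sailors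
instance (sailors : List (String × Int)) (out : List (List String)) : Decidable (Spec_two_teams sailors out) := by unfold Spec_two_teams; infer_instance

-- ===== CLAIM (what is proved, stated in full; the proofs are below) =====
def Claim_equal_two_teams : Prop := ∀ (sailors : List (String × Int)), Dom_two_teams sailors → Spec_two_teams sailors (two_teams sailors)

-- ===== LEMMAS AND PROOFS =====

-- A's loop body: test p sends a name to team_a; on Int ages ¬p implies the elif test, so the pair fold is two filters.
theorem pairfold_eq_filters (l : List String) (p : String → Prop) [DecidablePred p]
    (q : String → Prop) [DecidablePred q] (hq : ∀ x, ¬ p x → q x) (a b : List String) :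
    l.foldl (fun (acc : List String × List String) name =>
      if p name then (acc.1 ++ [name], acc.2)
      else if q name then (acc.1, acc.2 ++ [name])
      else acc) (a, b)
    = (a ++ l.filter (fun x => decide (p x)), b ++ l.filter (fun x => !decide (p x))) := by
  induction l generalizing a b with
  | nil => simp
  | cons x xs ih =>
    by_cases hp : p x
    · simp [hp, ih]
    · simp [hp, hq x hp, ih]

-- B's loop is two interleaved insertion sorts over the names of the filtered item list.
theorem itemsfold_split (l : List (String × Int)) (p : String × Int → Prop) [DecidablePred p]
    (a b : List String) :
    l.foldl (fun (acc : List String × List String) it =>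
      if p it then (insertSorted acc.1 it.1, acc.2)
      else (acc.1, insertSorted acc.2 it.1)) (a, b)
    = (((l.filter (fun it => decide (p it))).map (·.1)).foldl insertSorted a,
       ((l.filter (fun it => !decide (p it))).map (·.1)).foldl insertSorted b) := by
  induction l generalizing a b with
  | nil => simp
  | cons x xs ih =>
    by_cases hp : p x
    · simp [hp, ih]
    · simp [hp, ih]

theorem insertSorted_perm (l : List String) (x : String) : (insertSorted l x).Perm (x :: l) := by
  induction l with
  | nil => simp [insertSorted]
  | cons y ys ih =>
    by_cases h : y < x
    · simp only [insertSorted, if_pos h]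
      exact (ih.cons y).trans (List.Perm.swap x y ys)
    · simp [insertSorted, h]

theorem insertSorted_pairwise (l : List String) (x : String)
    (h : l.Pairwise (fun a b : String => a ≤ b)) :
    (insertSorted l x).Pairwise (fun a b : String => a ≤ b) := by
  induction l with
  | nil => simp [insertSorted]
  | cons y ys ih =>
    rw [List.pairwise_cons] at h
    by_cases hy : y < x
    · rw [insertSorted, if_pos hy, List.pairwise_cons]
      refine ⟨fun a ha => ?_, ih h.2⟩
      rcases List.mem_cons.mp ((insertSorted_perm ys x).mem_iff.mp ha) with rfl | hm
      · exact le_of_lt hy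
      · exact h.1 a hm
    · rw [insertSorted, if_neg hy, List.pairwise_cons]
      have hx : x ≤ y := le_of_not_gt hy
      refine ⟨fun a ha => ?_, List.pairwise_cons.mpr h⟩
      rcases List.mem_cons.mp ha with rfl | hm
      · exact hx
      · exact hx.trans (h.1 a hm)

theorem foldl_insertSorted_perm (L a : List String) :
    (L.foldl insertSorted a).Perm (a ++ L) := by
  induction L generalizing a with
  | nil => simp
  | cons x xs ih =>
    exact (ih _).trans (((insertSorted_perm a x).append_right xs).trans List.perm_middle.symm)

theorem foldl_insertSorted_pairwise (L a : List String)
    (h : a.Pairwise (fun a b : String => a ≤ b)) :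
    (L.foldl insertSorted a).Pairwise (fun a b : String => a ≤ b) := by
  induction L generalizing a with
  | nil => exact h
  | cons x xs ih => exact ih _ (insertSorted_pairwise a x h)

theorem nodup_pairwise_lt (l : List String) (hn : l.Nodup)
    (hle : l.Pairwise (fun a b : String => a ≤ b)) : l.Pairwise (fun a b : String => a < b) :=
  (List.Pairwise.and hn hle).imp (fun h => lt_of_le_of_ne h.2 h.1)

-- insertion sort of a duplicate-free String list IS Python's sorted
theorem isort_eq_sorted (L : List String) (hn : L.Nodup) :
    L.foldl insertSorted [] = PySem.List.sorted L (fun x => x) false := by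
  symm
  apply PySem.List.sorted_eq_of_perm_of_pairwise_lt
  · simpa using foldl_insertSorted_perm L []
  · apply nodup_pairwise_lt
    · exact ((foldl_insertSorted_perm L []).nodup_iff).mpr (by simpa using hn)
    · exact foldl_insertSorted_pairwise L [] (by simp)

-- a key-level filter on the looked-up age is the item-level filter on the stored age
theorem keys_filter_eq_items_filter (d : PySem.Dict String Int) (hn : d.keys.Nodup)
    (q : Int → Bool) :
    d.keys.filter (fun k => q ((d.get? k).getD 0)) =
    (d.items.filter (fun it => q it.2)).map (·.1) := by
  have hk : d.keys = d.items.map (·.1) := rfl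
  rw [hk, List.filter_map]
  congr 1
  apply List.filter_congr
  intro it hmem
  have h := PySem.Dict.get?_of_mem_items (d := d) (k := it.1) (v := it.2) (by simpa using hmem) hn
  simp [h]

theorem nodup_filtered_names (d : PySem.Dict String Int) (hn : d.keys.Nodup)
    (q : String × Int → Bool) : ((d.items.filter q).map (·.1)).Nodup :=
  hn.sublist ((d.items.filter_sublist (p := q)).map (·.1))

-- ===== VERDICT (by name: the statement is the Claim_ definition above) =====
theorem two_teams_spec : Claim_equal_two_teams := by
  intro sailors _
  unfold Spec_two_teams two_teams two_teams_alt
  set d := PySem.Dict.ofList sailors with hd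
  have hn : d.keys.Nodup := PySem.Dict.nodup_keys_ofList sailors
  have hA := pairfold_eq_filters d.keys
      (fun name => ((d.get? name).getD 0) > 40 ∨ ((d.get? name).getD 0) < 20)
      (fun name => 20 ≤ ((d.get? name).getD 0) ∧ ((d.get? name).getD 0) ≤ 40)
      (by intro x hx; omega) [] []
  have hB := itemsfold_split d.items (fun it => it.2 > 40 ∨ it.2 < 20) [] []
  simp only [hA, hB, List.nil_append]
  have h1 := keys_filter_eq_items_filter d hn (fun a => decide (a > 40 ∨ a < 20))
  have h2 := keys_filter_eq_items_filter d hn (fun a => !decide (a > 40 ∨ a < 20))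
  simp only [h1, h2]
  rw [isort_eq_sorted _ (nodup_filtered_names d hn _),
      isort_eq_sorted _ (nodup_filtered_names d hn _)]
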